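-- pv_equiv track=rewrite | github.com/OrchideousZ/Sonette | module/base/utils/points.py | separate_edges
-- ===== SOURCE A (Python) =====
-- def separate_edges(edges, inner):
--     """
--     根据内部点将边缘分为上下两部分。
--
--     Args:
--         edges: 边缘坐标列表。
--         inner (float, int): 分隔点。
--
--     Returns:
--         float, float: 下边缘和上边缘。
--     """
--     if len(edges) == 0:
--         return None, None
--     elif len(edges) == 1:
--         edge = edges[0]
--         return (None, edge) if edge > inner else (edge, None)
--     else:
--         lower = [edge for edge in edges if edge < inner]
--         upper = [edge for edge in edges if edge > inner]
--         lower = lower[0] if len(lower) else None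
--         upper = upper[-1] if len(upper) else None
--         return lower, upper
-- ===== SOURCE B (Python) =====
-- def separate_edges(edges, inner):
--     if len(edges) == 0:
--         return None, None
--     elif len(edges) == 1:
--         edge = edges[0]
--         return (None, edge) if edge > inner else (edge, None)
--     else:
--         lower = None
--         upper = None
--         for edge in edges:
--             if edge < inner and lower is None:
--                 lower = edge
--             if edge > inner:
--                 upper = edge
--         return lower, upper
-- ===== Notes on version B (the rewrite author's own statement) =====
-- stated objective: alternative
-- what changed: The else branch's two list comprehensions plus indexing are replaced by a single pass that tracks the first element below inner and the last element above inner, never building intermediate lists.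
import Mathlib
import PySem

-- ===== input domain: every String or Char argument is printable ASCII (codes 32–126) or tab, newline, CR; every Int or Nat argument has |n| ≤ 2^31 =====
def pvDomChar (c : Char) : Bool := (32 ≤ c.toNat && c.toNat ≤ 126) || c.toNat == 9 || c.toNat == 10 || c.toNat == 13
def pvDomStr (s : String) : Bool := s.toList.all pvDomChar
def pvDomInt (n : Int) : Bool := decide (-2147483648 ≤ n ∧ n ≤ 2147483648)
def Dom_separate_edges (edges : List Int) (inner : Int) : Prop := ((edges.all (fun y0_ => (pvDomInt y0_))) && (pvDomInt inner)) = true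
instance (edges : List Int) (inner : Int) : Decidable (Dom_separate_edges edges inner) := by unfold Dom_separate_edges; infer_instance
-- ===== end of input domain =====

-- B replaces the else branch's two filtering comprehensions with one fold tracking
-- the first element below inner and the last above; alternative decomposition, same cost class.
-- ===== PORT A =====
def separate_edges (edges : List Int) (inner : Int) : Option Int × Option Int :=
  match edges with
  | [] => (none, none)                                   -- len(edges) == 0
  | [edge] =>                                            -- len(edges) == 1
    if edge > inner then (none, some edge) else (some edge, none)
  | _ =>
    let lower := edges.filter (fun edge => edge < inner)
    let upper := edges.filter (fun edge => edge > inner)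
    (lower.head?, upper.getLast?)                        -- lower[0] / upper[-1], None if empty

-- ===== PORT B =====
def sepStep (inner : Int) (p : Option Int × Option Int) (edge : Int) : Option Int × Option Int :=
  ((if edge < inner && p.1 == none then some edge else p.1),
   (if edge > inner then some edge else p.2))

def separate_edges_alt (edges : List Int) (inner : Int) : Option Int × Option Int :=
  if edges.length = 0 then (none, none)
  else if edges.length = 1 then
    let edge := edges.headD 0          -- edges[0]; list is the nonempty singleton here
    if edge > inner then (none, some edge) else (some edge, none)
  else edges.foldl (sepStep inner) (none, none)

-- ===== PRECONDITION & SPEC =====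
def Spec_separate_edges (edges : List Int) (inner : Int) (out : Option Int × Option Int) : Prop := out = separate_edges_alt edges inner
instance (edges : List Int) (inner : Int) (out : Option Int × Option Int) : Decidable (Spec_separate_edges edges inner out) := by unfold Spec_separate_edges; infer_instance

-- ===== CLAIM (what is proved, stated in full; the proofs are below) =====
def Claim_equal_separate_edges : Prop := ∀ (edges : List Int) (inner : Int), Dom_separate_edges edges inner → Spec_separate_edges edges inner (separate_edges edges inner)

-- ===== LEMMAS AND PROOFS =====

lemma lastOrElse (x : Int) (l : List Int) (up : Option Int) :
    ((x :: l).getLast?).orElse (fun _ => up) = (l.getLast?).orElse (fun _ => some x) := by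
  cases l with
  | nil => simp
  | cons a as =>
    rw [List.getLast?_cons_cons]
    cases h : (a :: as).getLast? with
    | none => simp [List.getLast?_eq_none_iff] at h
    | some v => simp

lemma foldl_sepStep (inner : Int) (xs : List Int) (lo up : Option Int) :
    xs.foldl (sepStep inner) (lo, up)
      = (lo.orElse (fun _ => (xs.filter (fun e => e < inner)).head?),
         ((xs.filter (fun e => e > inner)).getLast?).orElse (fun _ => up)) := by
  induction xs generalizing lo up with
  | nil => cases lo <;> cases up <;> simp
  | cons x xs ih =>
    simp only [List.foldl_cons, sepStep, ih, List.filter_cons]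
    by_cases hlt : x < inner
    · have hgt : ¬ x > inner := by omega
      simp only [hlt, hgt, decide_true, decide_false, if_true, if_false]
      cases lo <;> simp
    · by_cases hgt : x > inner
      · have hnlt : decide (x < inner) = false := by simp [hlt]
        have hgt' : decide (x > inner) = true := by simp [hgt]
        simp only [hnlt, hgt', Bool.false_and, if_false, if_true, Bool.false_eq_true]
        rw [lastOrElse]
        simp [hgt]
      · simp [hlt, hgt]

-- ===== VERDICT (by name: the statement is the Claim_ definition above) =====
theorem separate_edges_spec : Claim_equal_separate_edges := by
  intro edges inner _
  unfold Spec_separate_edges separate_edges separate_edges_alt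
  match edges with
  | [] => rfl
  | [e] => rfl
  | a :: b :: rest =>
    simp only [List.length, foldl_sepStep]
    norm_num
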